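-- pv_equiv track=rewrite | github.com/ramprasadp/drikganita | csv2cal.py | build_weeks
-- ===== SOURCE A (Python) =====
-- def build_weeks(rows):
--     weeks, cur = [], {}
--     for row in rows:
--         wd = row["_wd"]
--         if wd == 0 and cur:  # new Sunday = new week
--             weeks.append(cur)
--             cur = {}
--         cur[wd] = row
--     if cur:
--         weeks.append(cur)
--     return weeks
-- ===== SOURCE B (Python) =====
-- def build_weeks(rows):
--     weeks = []
--     i, n = 0, len(rows)
--     while i < n:
--         j = i + 1
--         while j < n and rows[j]["_wd"] != 0:
--             j += 1
--         weeks.append({r["_wd"]: r for r in rows[i:j]})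
--         i = j
--     return weeks
-- ===== Notes on version B (the rewrite author's own statement) =====
-- stated objective: alternative
-- what changed: Replaces A's single streaming pass with a flush-on-Sunday accumulator by an index-scan decomposition: an outer loop that finds the end of each week by scanning forward for the next Sunday row, then builds that week's dict from the slice in one comprehension.
import Mathlib
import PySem

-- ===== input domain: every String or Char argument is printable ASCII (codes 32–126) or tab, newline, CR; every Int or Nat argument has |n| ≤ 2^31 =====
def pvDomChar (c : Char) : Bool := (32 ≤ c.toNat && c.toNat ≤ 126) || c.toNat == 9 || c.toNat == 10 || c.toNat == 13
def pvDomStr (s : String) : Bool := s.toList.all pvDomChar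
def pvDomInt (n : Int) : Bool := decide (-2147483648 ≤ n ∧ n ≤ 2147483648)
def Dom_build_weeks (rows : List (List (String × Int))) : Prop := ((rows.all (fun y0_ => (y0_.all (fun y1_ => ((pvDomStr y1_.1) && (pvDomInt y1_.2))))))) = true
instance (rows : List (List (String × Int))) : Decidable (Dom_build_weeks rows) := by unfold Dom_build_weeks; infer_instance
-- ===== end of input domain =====

-- B replaces A's single streaming accumulator by an index-scan decomposition: find the end
-- of each week by scanning for the next Sunday, then build that week's dict from the slice
-- (objective: alternative decomposition, same cost).

-- Input marshalling shared by both ports: a Python caller passes each row as a dict, so a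
-- row arrives deduplicated in Python-dict order, and row["_wd"] reads that dict.
def pvRow (r : List (String × Int)) : List (String × Int) :=
  (PySem.Dict.ofList r).items

def pvWd? (r : List (String × Int)) : Option Int :=
  (PySem.Dict.ofList r).get? "_wd"

-- row["_wd"]; Pre_build_weeks guarantees the key is present (none = KeyError, excluded)
def pvWd (r : List (String × Int)) : Int := (pvWd? r).getD 0

-- ===== PORT A =====
-- A's loop: state (weeks, cur); flush cur on a Sunday row when cur is non-empty ('wd == 0 and cur').
def pvBuildA_loop (rows : List (List (String × Int)))
    (weeks : List (PySem.Dict Int (List (String × Int))))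
    (cur : PySem.Dict Int (List (String × Int))) :
    List (PySem.Dict Int (List (String × Int))) :=
  match rows with
  | [] => if cur.size = 0 then weeks else weeks ++ [cur]
  | row :: rs =>
      let wd := pvWd row
      if wd = 0 ∧ cur.size ≠ 0 then
        pvBuildA_loop rs (weeks ++ [cur]) (PySem.Dict.insert PySem.Dict.empty wd (pvRow row))
      else
        pvBuildA_loop rs weeks (PySem.Dict.insert cur wd (pvRow row))

def build_weeks (rows : List (List (String × Int))) : List (List (Int × List (String × Int))) :=
  (pvBuildA_loop rows [] PySem.Dict.empty).map (fun d => d.items)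

-- ===== PORT B =====
-- {r["_wd"]: r for r in seg}
def pvWeekOf (seg : List (List (String × Int))) : List (Int × List (String × Int)) :=
  (seg.foldl (fun d r => d.insert (pvWd r) (pvRow r)) PySem.Dict.empty).items

-- outer while: each week is the row at i followed by the run of non-Sunday rows after it
def build_weeks_alt (rows : List (List (String × Int))) : List (List (Int × List (String × Int))) :=
  match rows with
  | [] => []
  | r :: rs =>
      pvWeekOf (r :: rs.takeWhile (fun x => pvWd x ≠ 0)) ::
        build_weeks_alt (rs.dropWhile (fun x => pvWd x ≠ 0))
termination_by rows.length
decreasing_by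
  simp only [List.length_cons]
  exact Nat.lt_succ_of_le (List.length_dropWhile_le _ _)

-- ===== PRECONDITION & SPEC =====
-- Pre_ excludes exactly the rows without an "_wd" key, on which Python A raises KeyError.
def Pre_build_weeks (rows : List (List (String × Int))) : Prop :=
  ∀ r ∈ rows, (r.map Prod.fst).contains "_wd" = true

instance (rows : List (List (String × Int))) : Decidable (Pre_build_weeks rows) := by
  unfold Pre_build_weeks; infer_instance

def pvWitness_build_weeks : (List (List (String × Int))) :=
  [[("_wd", 0), ("y", 3)], [("_wd", 1), ("y", 4)], [("_wd", 0), ("y", 5)]]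

def Spec_build_weeks (rows : List (List (String × Int))) (out : List (List (Int × List (String × Int)))) : Prop := out = build_weeks_alt rows
instance (rows : List (List (String × Int))) (out : List (List (Int × List (String × Int)))) : Decidable (Spec_build_weeks rows out) := by unfold Spec_build_weeks; infer_instance

-- ===== CLAIM (what is proved, stated in full; the proofs are below) =====
def Claim_equal_build_weeks : Prop := ∀ (rows : List (List (String × Int))), Dom_build_weeks rows → Pre_build_weeks rows → Spec_build_weeks rows (build_weeks rows)

-- ===== LEMMAS AND PROOFS =====

lemma pv_insert_size_ne_zero {κ ν : Type} [BEq κ] [LawfulBEq κ] (d : PySem.Dict κ ν) (k : κ) (v : ν) :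
    (d.insert k v).size ≠ 0 := by
  cases hd : d.contains k with
  | false =>
      simp [PySem.Dict.size, PySem.Dict.items_insert_of_not_contains (h := hd)]
  | true =>
      have hk : k ∈ d.keys := (PySem.Dict.contains_iff_mem_keys d k).mp hd
      have hne : d.items ≠ [] := by
        intro h0
        simp [PySem.Dict.keys, h0] at hk
      simp [PySem.Dict.size, PySem.Dict.items_insert_of_contains (h := hd), hne]

lemma pv_loop_spec (rows : List (List (String × Int)))
    (weeks : List (PySem.Dict Int (List (String × Int))))
    (cur : PySem.Dict Int (List (String × Int))) (hcur : cur.size ≠ 0) :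
    (pvBuildA_loop rows weeks cur).map (fun d => d.items)
      = weeks.map (fun d => d.items)
        ++ ((rows.takeWhile (fun x => pvWd x ≠ 0)).foldl
              (fun d r => d.insert (pvWd r) (pvRow r)) cur).items
           :: build_weeks_alt (rows.dropWhile (fun x => pvWd x ≠ 0)) := by
  induction rows generalizing weeks cur with
  | nil =>
      simp [pvBuildA_loop, hcur, build_weeks_alt]
  | cons r rs ih =>
      by_cases hp : pvWd r = 0
      · have hcond : pvWd r = 0 ∧ cur.size ≠ 0 := ⟨hp, hcur⟩
        simp only [pvBuildA_loop]
        rw [if_pos hcond]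
        rw [ih _ _ (pv_insert_size_ne_zero _ _ _)]
        have htw : (r :: rs).takeWhile (fun x => decide (pvWd x ≠ 0)) = [] := by
          simp [hp]
        have hdw : (r :: rs).dropWhile (fun x => decide (pvWd x ≠ 0)) = r :: rs := by
          simp [hp]
        simp only [htw, hdw, List.foldl_nil]
        rw [build_weeks_alt]
        simp [pvWeekOf, hp, List.map_append]
      · simp only [pvBuildA_loop]
        rw [if_neg (by simp [hp])]
        rw [ih _ _ (pv_insert_size_ne_zero _ _ _)]
        simp [hp]

-- ===== VERDICT (by name: the statement is the Claim_ definition above) =====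
theorem build_weeks_spec : Claim_equal_build_weeks := by
  intro rows _ _
  unfold Spec_build_weeks
  cases rows with
  | nil => simp [build_weeks, pvBuildA_loop, build_weeks_alt]
  | cons r rs =>
      unfold build_weeks
      simp only [pvBuildA_loop]
      rw [if_neg (by simp [PySem.Dict.size_empty])]
      rw [pv_loop_spec _ _ _ (pv_insert_size_ne_zero _ _ _)]
      rw [build_weeks_alt]
      simp [pvWeekOf]
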